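-- pv_equiv track=rewrite | github.com/Hugo0/wordle | scripts/word_pipeline/freeze.py | _ring_select
-- ===== SOURCE A (Python) =====
-- def _ring_select(
--     precomputed: list[tuple[str, str]],
--     exclude: set[str],
--     day_h: str,
-- ) -> str | None:
--     """Pick the first word on the hash ring >= day_h, skipping excluded words."""
--     first_valid = None
--     for word_h, word in precomputed:
--         if word in exclude:
--             continue
--         if first_valid is None:
--             first_valid = word  # wraparound fallback
--         if word_h >= day_h:
--             return word
--     return first_valid  # wraparound or None if all excluded
-- ===== SOURCE B (Python) =====
-- def _ring_select(
--     precomputed: list[tuple[str, str]],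
--     exclude: set[str],
--     day_h: str,
-- ) -> str | None:
--     """Back-to-front pass with overwrite semantics: traverse the ring in
--     reverse with no early exit; each non-excluded entry overwrites the
--     fallback, and overwrites the hit when its hash >= day_h, so after the
--     pass the surviving values are the LEFTMOST valid hit and the LEFTMOST
--     valid word (the wraparound fallback)."""
--     hit = None
--     fallback = None
--     for word_h, word in reversed(precomputed):
--         if word not in exclude:
--             fallback = word
--             if word_h >= day_h:
--                 hit = word
--     return hit if hit is not None else fallback
-- ===== Notes on version B (the rewrite author's own statement) =====
-- stated objective: alternative
-- what changed: Replaces A's forward loop with early return and a write-once first_valid sentinel by a reverse (back-to-front) full pass with overwrite semantics: every non-excluded entry overwrites the fallback and, when its hash >= day_h, the hit, so the leftmost candidates survive by being written last.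
import Mathlib
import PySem

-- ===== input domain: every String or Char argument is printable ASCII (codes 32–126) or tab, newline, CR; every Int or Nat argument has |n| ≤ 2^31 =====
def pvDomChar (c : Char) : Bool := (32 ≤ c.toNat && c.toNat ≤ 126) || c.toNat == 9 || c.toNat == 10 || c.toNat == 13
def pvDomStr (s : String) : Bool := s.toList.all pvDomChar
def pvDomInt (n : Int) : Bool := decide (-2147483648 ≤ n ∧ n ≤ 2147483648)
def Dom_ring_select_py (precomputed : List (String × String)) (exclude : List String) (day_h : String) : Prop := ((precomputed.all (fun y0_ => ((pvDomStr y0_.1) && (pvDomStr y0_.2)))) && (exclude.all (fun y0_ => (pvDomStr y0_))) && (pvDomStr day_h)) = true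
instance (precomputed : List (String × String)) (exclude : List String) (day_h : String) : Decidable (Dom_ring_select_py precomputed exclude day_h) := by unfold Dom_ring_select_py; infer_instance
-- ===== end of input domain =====

-- ===== PORT A =====
-- B traverses the ring back-to-front with overwrite semantics instead of A's forward early-return loop (same cost, alternative algorithm).
def ringSelLoop : List (String × String) → List String → String → Option String → Option String
  | [], _, _, fv => fv
  | (word_h, word) :: rest, exclude, day_h, fv =>
    if exclude.contains word then ringSelLoop rest exclude day_h fv
    else
      let fv' := if fv = none then some word else fv
      if day_h ≤ word_h then some word else ringSelLoop rest exclude day_h fv'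

def ring_select_py (precomputed : List (String × String)) (exclude : List String) (day_h : String) : Option String :=
  ringSelLoop precomputed exclude day_h none

-- ===== PORT B =====
-- state = (hit, fallback); one step of B's reversed loop body
def ringSelRevStep (exclude : List String) (day_h : String)
    (s : Option String × Option String) (p : String × String) : Option String × Option String :=
  if !(exclude.contains p.2) then
    (if day_h ≤ p.1 then some p.2 else s.1, some p.2)
  else s

def ring_select_py_alt (precomputed : List (String × String)) (exclude : List String) (day_h : String) : Option String :=
  let st := precomputed.reverse.foldl (ringSelRevStep exclude day_h) (none, none)
  match st.1 with
  | some w => some w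
  | none => st.2

-- ===== PRECONDITION & SPEC =====
def Spec_ring_select_py (precomputed : List (String × String)) (exclude : List String) (day_h : String) (out : Option String) : Prop := out = ring_select_py_alt precomputed exclude day_h
instance (precomputed : List (String × String)) (exclude : List String) (day_h : String) (out : Option String) : Decidable (Spec_ring_select_py precomputed exclude day_h out) := by unfold Spec_ring_select_py; infer_instance

-- ===== CLAIM (what is proved, stated in full; the proofs are below) =====
def Claim_equal_ring_select_py : Prop := ∀ (precomputed : List (String × String)) (exclude : List String) (day_h : String), Dom_ring_select_py precomputed exclude day_h → Spec_ring_select_py precomputed exclude day_h (ring_select_py precomputed exclude day_h)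

-- ===== LEMMAS AND PROOFS =====

-- characterisation of A's loop: find? over the filtered list, with fallback fv
-- when set, else the head of the filtered remainder
lemma ringSelLoop_eq (l : List (String × String)) (exclude : List String) (day_h : String) :
    ∀ fv : Option String,
    ringSelLoop l exclude day_h fv =
      (match (l.filter (fun p => !(exclude.contains p.2))).find? (fun p => decide (day_h ≤ p.1)) with
       | some p => some p.2
       | none => match fv with
                 | some v => some v
                 | none => ((l.filter (fun p => !(exclude.contains p.2))).head?).map Prod.snd) := by
  induction l with
  | nil => intro fv; cases fv <;> simp [ringSelLoop]
  | cons hd tl ih =>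
    intro fv
    obtain ⟨word_h, word⟩ := hd
    by_cases hex : word ∈ exclude
    · rw [ringSelLoop, if_pos (by simpa using hex), ih fv,
        List.filter_cons_of_neg (by simpa using hex)]
    · rw [ringSelLoop, if_neg (by simpa using hex),
        List.filter_cons_of_pos (by simpa using hex)]
      by_cases hcmp : day_h ≤ word_h
      · rw [if_pos hcmp, List.find?_cons_of_pos (by simpa using hcmp)]
      · rw [if_neg hcmp, List.find?_cons_of_neg (by simpa using hcmp)]
        cases fv with
        | none =>
          rw [show (if (none : Option String) = none then some word else none) = some word
            from rfl, ih (some word)]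
          cases (tl.filter (fun p => !(exclude.contains p.2))).find? (fun p => decide (day_h ≤ p.1)) <;> simp
        | some v =>
          rw [show (if (some v : Option String) = none then some word else some v) = some v
            from rfl, ih (some v)]

-- characterisation of B's reverse overwrite pass: hit = leftmost valid match,
-- fallback = leftmost valid word
lemma ringSelRev_eq (exclude : List String) (day_h : String) (l : List (String × String)) :
    l.reverse.foldl (ringSelRevStep exclude day_h) (none, none) =
      (((l.filter (fun p => !(exclude.contains p.2))).find? (fun p => decide (day_h ≤ p.1))).map Prod.snd,
       ((l.filter (fun p => !(exclude.contains p.2))).head?).map Prod.snd) := by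
  rw [List.foldl_reverse]
  induction l with
  | nil => simp
  | cons hd tl ih =>
    obtain ⟨word_h, word⟩ := hd
    rw [List.foldr_cons, ih, ringSelRevStep]
    by_cases hex : word ∈ exclude
    · rw [if_neg (by simpa using hex), List.filter_cons_of_neg (by simpa using hex)]
    · rw [if_pos (by simpa using hex), List.filter_cons_of_pos (by simpa using hex)]
      by_cases hcmp : day_h ≤ word_h
      · rw [List.find?_cons_of_pos (by simpa using hcmp), if_pos hcmp]
        simp
      · rw [List.find?_cons_of_neg (by simpa using hcmp), if_neg hcmp]
        simp

-- ===== VERDICT (by name: the statement is the Claim_ definition above) =====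
theorem ring_select_py_spec : Claim_equal_ring_select_py := by
  intro precomputed exclude day_h _
  unfold Spec_ring_select_py ring_select_py ring_select_py_alt
  rw [ringSelLoop_eq, ringSelRev_eq]
  cases (precomputed.filter (fun p => !(exclude.contains p.2))).find? (fun p => decide (day_h ≤ p.1)) <;> simp
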